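-- pv_equiv track=rewrite | github.com/flyingcircusio/batou_ext | src/batou_ext/fcio.py | values_equal
-- ===== SOURCE A (Python) =====
-- from typing import Any, Dict, Optional, Set, Tuple, Union
--
-- def values_equal(val1: Any, val2: Any) -> bool:
--     if val1 is None and val2 is None:
--         return True
--     if val1 is None or val2 is None:
--         return False
--
--     def normalize(v):
--         if isinstance(v, str):
--             if "\n" in v:
--                 items = [item.strip() for item in v.split("\n") if item.strip()]
--                 return sorted(items)
--             else:
--                 return [v.strip()]
--         elif isinstance(v, list):
--             return sorted([str(item).strip() for item in v])
--         else:
--             return [str(v).strip()]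
--
--     return normalize(val1) == normalize(val2)
-- ===== SOURCE B (Python) =====
-- def values_equal(val1, val2):
--     if val1 is None and val2 is None:
--         return True
--     if val1 is None or val2 is None:
--         return False
--
--     def counts(items):
--         c = {}
--         for it in items:
--             c[it] = c.get(it, 0) + 1
--         return c
--
--     def normalize(v):
--         if isinstance(v, str):
--             if "\n" in v:
--                 return counts(item.strip() for item in v.split("\n") if item.strip())
--             return counts([v.strip()])
--         if isinstance(v, list):
--             return counts(str(item).strip() for item in v)
--         return counts([str(v).strip()])
--
--     return normalize(val1) == normalize(val2)
-- ===== Notes on version B (the rewrite author's own statement) =====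
-- stated objective: alternative
-- what changed: Order-insensitive comparison done by building a multiset count dictionary per value and comparing the dictionaries, instead of sorting the normalized item lists and comparing them elementwise.
import Mathlib
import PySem

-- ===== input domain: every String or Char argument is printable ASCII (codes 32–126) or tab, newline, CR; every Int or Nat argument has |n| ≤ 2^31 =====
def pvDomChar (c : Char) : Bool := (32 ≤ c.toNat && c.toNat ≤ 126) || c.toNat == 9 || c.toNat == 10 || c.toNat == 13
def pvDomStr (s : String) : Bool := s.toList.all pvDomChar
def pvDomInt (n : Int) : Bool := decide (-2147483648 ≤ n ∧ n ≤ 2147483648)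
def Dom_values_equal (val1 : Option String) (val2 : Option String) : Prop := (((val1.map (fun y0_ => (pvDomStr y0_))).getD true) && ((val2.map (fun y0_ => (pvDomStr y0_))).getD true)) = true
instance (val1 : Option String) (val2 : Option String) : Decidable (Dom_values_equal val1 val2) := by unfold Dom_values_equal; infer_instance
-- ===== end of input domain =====

-- B replaces sorted-list comparison by multiset count-dictionary comparison (alternative decomposition, same cost class).


-- shared item list: the comprehension '[item.strip() for item in v.split("\n") if item.strip()]'
-- / the single-item branch, identical text in both Pythons; split? is some since the separator "\n" is nonempty
def pvItems (s : String) : List String :=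
  if PySem.Str.isIn "\n" s then
    (((PySem.Str.split? s "\n").getD []).filter
        (fun item => !(PySem.Str.strip item == ""))).map (fun item => PySem.Str.strip item)
  else [PySem.Str.strip s]

-- ===== PORT A =====
-- A's normalize on a str input: sorted item list (other isinstance branches are unreachable for Option String)
def pvNormA (s : String) : List String :=
  PySem.List.sorted (pvItems s) (fun x => x) false

def values_equal (val1 : Option String) (val2 : Option String) : Bool :=
  match val1, val2 with
  | none, none => true
  | none, some _ => false
  | some _, none => false
  | some s1, some s2 => pvNormA s1 == pvNormA s2

-- ===== PORT B =====
-- B's counts(): the dict-building loop 'c[it] = c.get(it, 0) + 1'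
def pvCounts (items : List String) : PySem.Dict String Int :=
  items.foldl (fun c it => c.insert it (c.getD it 0 + 1)) PySem.Dict.empty

-- Python's 'd1 == d2' on dicts (order-insensitive): every item of each dict is present in the other
def pvDictEq (d1 d2 : PySem.Dict String Int) : Bool :=
  d1.items.all (fun kv => d2.getD kv.1 0 == kv.2) &&
  d2.items.all (fun kv => d1.getD kv.1 0 == kv.2)

def values_equal_alt (val1 : Option String) (val2 : Option String) : Bool :=
  match val1, val2 with
  | none, none => true
  | none, some _ => false
  | some _, none => false
  | some s1, some s2 => pvDictEq (pvCounts (pvItems s1)) (pvCounts (pvItems s2))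

-- ===== PRECONDITION & SPEC =====
def Spec_values_equal (val1 : Option String) (val2 : Option String) (out : Bool) : Prop := out = values_equal_alt val1 val2
instance (val1 : Option String) (val2 : Option String) (out : Bool) : Decidable (Spec_values_equal val1 val2 out) := by unfold Spec_values_equal; infer_instance

-- ===== CLAIM (what is proved, stated in full; the proofs are below) =====
def Claim_equal_values_equal : Prop := ∀ (val1 : Option String) (val2 : Option String), Dom_values_equal val1 val2 → Spec_values_equal val1 val2 (values_equal val1 val2)

-- ===== LEMMAS AND PROOFS =====

theorem pvCounts_eq_counter (xs : List String) : pvCounts xs = PySem.Dict.counter xs :=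
  PySem.Dict.foldl_insert_getD_add_one_eq_counter xs

theorem pvDictEq_counter_iff (xs ys : List String) :
    pvDictEq (PySem.Dict.counter xs) (PySem.Dict.counter ys) = true ↔ xs.Perm ys := by
  unfold pvDictEq
  simp only [Bool.and_eq_true, List.all_eq_true, PySem.Dict.items_counter,
    List.mem_map, PySem.Dict.getD_counter, beq_iff_eq]
  constructor
  · rintro ⟨h1, h2⟩
    rw [List.perm_iff_count]
    intro v
    by_cases hx : v ∈ xs
    · have := h1 (v, (xs.count v : Int)) ⟨v, by simp [PySem.Set.mem_ofList, hx]⟩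
      simpa using this.symm
    · by_cases hy : v ∈ ys
      · have := h2 (v, (ys.count v : Int)) ⟨v, by simp [PySem.Set.mem_ofList, hy]⟩
        simpa using this
      · simp [List.count_eq_zero_of_not_mem hx, List.count_eq_zero_of_not_mem hy]
  · intro hp
    have hc := List.perm_iff_count.mp hp
    constructor
    · rintro kv ⟨x, hx, rfl⟩
      simp [hc x]
    · rintro kv ⟨x, hx, rfl⟩
      simp [hc x]

theorem normA_eq_iff_perm (s1 s2 : String) :
    (pvNormA s1 == pvNormA s2) = true ↔ (pvItems s1).Perm (pvItems s2) := by
  unfold pvNormA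
  rw [beq_iff_eq]
  exact PySem.List.sorted_id_eq_sorted_id_iff_perm _ _

-- ===== VERDICT (by name: the statement is the Claim_ definition above) =====
theorem values_equal_spec : Claim_equal_values_equal := by
  intro val1 val2 _
  unfold Spec_values_equal
  match val1, val2 with
  | none, none => rfl
  | none, some _ => rfl
  | some _, none => rfl
  | some s1, some s2 =>
    show (pvNormA s1 == pvNormA s2) = pvDictEq (pvCounts (pvItems s1)) (pvCounts (pvItems s2))
    rw [pvCounts_eq_counter, pvCounts_eq_counter]
    rcases h : pvDictEq (PySem.Dict.counter (pvItems s1)) (PySem.Dict.counter (pvItems s2)) with _ | _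
    · rw [← Bool.not_eq_true] at h ⊢
      intro hc
      exact h ((pvDictEq_counter_iff _ _).mpr ((normA_eq_iff_perm s1 s2).mp hc))
    · exact (normA_eq_iff_perm s1 s2).mpr ((pvDictEq_counter_iff _ _).mp h)
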